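-- pv_equiv track=rewrite | github.com/PaulPidou/Jeu-de-la-vie | pattern.py | detectComma
-- ===== SOURCE A (Python) =====
-- def detectComma(string):
--     "Détecte les virgules de premier niveaux et renvoie leur position dans la chaine de caractères"
--     cpt1 = cpt2 = 0
--     pos = []
--     for i in range(len(string)):
--         if string[i] == '[':
--             cpt1 += 1
--         elif string[i] == '(':
--             cpt2 += 1
--         elif string[i] == ']':
--             cpt1 -= 1
--         elif string[i] == ')':
--             cpt2 -= 1
--         elif string[i] == ',' and cpt1 == 1 and cpt2 == 0:
--             pos.append(i)
--     return pos
-- ===== SOURCE B (Python) =====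
-- def detectComma(string):
--     "Détecte les virgules de premier niveaux et renvoie leur position dans la chaine de caractères"
--     sq = [0]
--     pr = [0]
--     for ch in string:
--         sq.append(sq[-1] + (ch == '[') - (ch == ']'))
--         pr.append(pr[-1] + (ch == '(') - (ch == ')'))
--     return [i for i, ch in enumerate(string) if ch == ',' and sq[i] == 1 and pr[i] == 0]
-- ===== Notes on version B (the rewrite author's own statement) =====
-- stated objective: alternative
-- what changed: A maintains running bracket counters and appends matching comma positions inside one stateful loop; B first builds two prefix-depth tables (square and round) in one pass and then selects comma indices with a state-free filtering pass over the table lookups.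
import Mathlib
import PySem

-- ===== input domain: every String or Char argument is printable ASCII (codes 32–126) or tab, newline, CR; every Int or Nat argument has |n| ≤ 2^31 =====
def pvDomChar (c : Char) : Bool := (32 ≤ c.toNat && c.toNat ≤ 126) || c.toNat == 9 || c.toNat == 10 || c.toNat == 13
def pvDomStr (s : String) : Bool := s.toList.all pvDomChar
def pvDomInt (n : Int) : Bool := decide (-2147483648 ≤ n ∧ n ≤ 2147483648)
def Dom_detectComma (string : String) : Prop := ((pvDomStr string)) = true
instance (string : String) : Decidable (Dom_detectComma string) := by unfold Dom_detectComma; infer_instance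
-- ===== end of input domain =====

-- B replaces A's inline running counters by two prefix-depth tables built in a first pass
-- plus a state-free selection pass (objective: alternative decomposition, same cost).


-- ===== PORT A =====
-- one step of A's loop body, on state (cpt1, cpt2, pos)
def stepA (st : Int × Int × List Int) (p : Int × Char) : Int × Int × List Int :=
  if p.2 = '[' then (st.1 + 1, st.2.1, st.2.2)
  else if p.2 = '(' then (st.1, st.2.1 + 1, st.2.2)
  else if p.2 = ']' then (st.1 - 1, st.2.1, st.2.2)
  else if p.2 = ')' then (st.1, st.2.1 - 1, st.2.2)
  else if p.2 = ',' ∧ st.1 = 1 ∧ st.2.1 = 0 then (st.1, st.2.1, st.2.2 ++ [p.1])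
  else st

def detectComma (string : String) : List Int :=
  ((PySem.List.enumerate string.toList 0).foldl stepA (0, 0, ([] : List Int))).2.2

-- ===== PORT B =====
-- one step of B's table-building loop: append the next prefix depths (sq[-1]±…, pr[-1]±…)
def stepB (t : List Int × List Int) (ch : Char) : List Int × List Int :=
  (t.1 ++ [PySem.List.pyGetD t.1 (-1) 0 + (if ch = '[' then (1:Int) else 0) - (if ch = ']' then (1:Int) else 0)],
   t.2 ++ [PySem.List.pyGetD t.2 (-1) 0 + (if ch = '(' then (1:Int) else 0) - (if ch = ')' then (1:Int) else 0)])

def detectComma_alt (string : String) : List Int :=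
  let t := string.toList.foldl stepB ([0], [0])
  (PySem.List.enumerate string.toList 0).filterMap
    (fun p => if p.2 = ',' ∧ PySem.List.pyGetD t.1 p.1 0 = 1 ∧ PySem.List.pyGetD t.2 p.1 0 = 0
              then some p.1 else none)

-- ===== PRECONDITION & SPEC =====
def Spec_detectComma (string : String) (out : List Int) : Prop := out = detectComma_alt string
instance (string : String) (out : List Int) : Decidable (Spec_detectComma string out) := by unfold Spec_detectComma; infer_instance

-- ===== CLAIM (what is proved, stated in full; the proofs are below) =====
def Claim_equal_detectComma : Prop := ∀ (string : String), Dom_detectComma string → Spec_detectComma string (detectComma string)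

-- ===== LEMMAS AND PROOFS =====

-- net bracket depth contributed by a list of characters
def cnt (l : List Char) (a b : Char) : Int := (l.count a : Int) - (l.count b : Int)

-- the positions both programs compute: commas whose strict prefix has depths (1, 0)
def specPos (l : List Char) : List Int :=
  (PySem.List.enumerate l 0).filterMap
    (fun p => if p.2 = ',' ∧ cnt (l.take p.1.toNat) '[' ']' = 1 ∧ cnt (l.take p.1.toNat) '(' ')' = 0
              then some p.1 else none)

lemma cnt_append_singleton (ds : List Char) (c a b : Char) :
    cnt (ds ++ [c]) a b = cnt ds a b + (if c = a then 1 else 0) - (if c = b then 1 else 0) := by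
  simp [cnt, List.count_append, List.count_singleton]
  by_cases h1 : c = a <;> by_cases h2 : c = b <;> simp [h1, h2] <;> omega

lemma specPos_append (ds : List Char) (c : Char) :
    specPos (ds ++ [c]) = specPos ds ++
      (if c = ',' ∧ cnt ds '[' ']' = 1 ∧ cnt ds '(' ')' = 0 then [(ds.length : Int)] else []) := by
  unfold specPos
  rw [PySem.List.enumerate_append, List.filterMap_append]
  congr 1
  · apply List.filterMap_congr
    intro p hp
    rcases (PySem.List.mem_enumerate_iff _ _ _).mp hp with ⟨k, hk, rfl⟩
    simp only [Int.toNat_natCast, zero_add]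
    rw [List.take_append_of_le_length (by omega)]
  · simp only [PySem.List.enumerate_cons, PySem.List.enumerate_nil, List.filterMap_cons,
      List.filterMap_nil, Int.toNat_natCast, zero_add, List.take_left]
    split_ifs <;> simp

lemma foldA_eq (cs : List Char) :
    (PySem.List.enumerate cs 0).foldl stepA (0, 0, ([] : List Int)) =
      (cnt cs '[' ']', cnt cs '(' ')', specPos cs) := by
  induction cs using List.reverseRecOn with
  | nil => simp [PySem.List.enumerate_nil, cnt, specPos]
  | append_singleton ds c ih =>
    rw [PySem.List.enumerate_append, List.foldl_append, ih,
        PySem.List.enumerate_cons, PySem.List.enumerate_nil]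
    simp only [List.foldl_cons, List.foldl_nil, zero_add]
    rw [specPos_append, cnt_append_singleton ds c '[' ']', cnt_append_singleton ds c '(' ')']
    unfold stepA
    by_cases h1 : c = '[' <;> by_cases h2 : c = '(' <;> by_cases h3 : c = ']' <;>
      by_cases h4 : c = ')' <;> by_cases h5 : c = ',' <;>
      simp_all <;>
      · ring_nf
        split_ifs <;> simp_all

-- the depth tables B builds, characterised as maps over prefix lengths
def tab (l : List Char) (a b : Char) : List Int :=
  (List.range (l.length + 1)).map (fun i => cnt (l.take i) a b)

lemma tab_last (ds : List Char) (a b : Char) :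
    PySem.List.pyGetD (tab ds a b) (-1) 0 = cnt ds a b := by
  unfold tab
  rw [List.range_succ, List.map_append]
  simp [PySem.List.pyGetD_neg_one_append_singleton]

lemma tab_append_singleton (ds : List Char) (c a b : Char) :
    tab (ds ++ [c]) a b = tab ds a b ++ [cnt (ds ++ [c]) a b] := by
  unfold tab
  rw [show (ds ++ [c]).length + 1 = (ds.length + 1) + 1 by simp, List.range_succ, List.map_append]
  congr 1
  · apply List.map_eq_map_iff.mpr
    intro i hi
    rw [List.take_append_of_le_length (by simp at hi; omega)]
  · simp only [List.map_cons, List.map_nil]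
    rw [List.take_of_length_le (by simp)]

lemma foldB_eq (cs : List Char) :
    cs.foldl stepB ([0], [0]) = (tab cs '[' ']', tab cs '(' ')') := by
  induction cs using List.reverseRecOn with
  | nil => simp [tab, cnt]
  | append_singleton ds c ih =>
    rw [List.foldl_append, ih]
    simp only [List.foldl_cons, List.foldl_nil]
    unfold stepB
    simp only [tab_last]
    rw [tab_append_singleton, tab_append_singleton,
        cnt_append_singleton ds c '[' ']', cnt_append_singleton ds c '(' ')']

lemma tab_lookup (l : List Char) (a b : Char) (k : Nat) (hk : k < l.length + 1) :
    PySem.List.pyGetD (tab l a b) (k : Int) 0 = cnt (l.take k) a b := by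
  rw [PySem.List.pyGetD_natCast]
  unfold tab
  simp [hk]

-- ===== VERDICT (by name: the statement is the Claim_ definition above) =====
theorem detectComma_spec : Claim_equal_detectComma := by
  intro s _
  unfold Spec_detectComma detectComma detectComma_alt
  rw [foldA_eq, foldB_eq]
  show specPos s.toList = _
  unfold specPos
  apply List.filterMap_congr
  intro p hp
  rcases (PySem.List.mem_enumerate_iff _ _ _).mp hp with ⟨k, hk, rfl⟩
  simp only [zero_add, Int.toNat_natCast]
  rw [tab_lookup _ _ _ k (by omega), tab_lookup _ _ _ k (by omega)]
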